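-- pv_equiv track=rewrite | github.com/jk-jung/problem-solving | codewars/7kyu/7_Concatenated Sum.py | f
-- ===== SOURCE A (Python) =====
-- def f(n, t):
--     if n < 0:
--         return -f(-n, t)
--     r = 0
--     for x in str(n):
--         for i in range(t):
--             r += 10 ** i * int(x)
--     return r
-- ===== SOURCE B (Python) =====
-- def f(n, t):
--     # digit sum times the t-digit repunit (10**t - 1) // 9, with the sign of n
--     if t <= 0:
--         return 0
--     sign = -1 if n < 0 else 1
--     n = abs(n)
--     ds = 0
--     while n > 0:
--         n, d = divmod(n, 10)
--         ds += d
--     return sign * ds * ((10 ** t - 1) // 9)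
-- ===== Notes on version B (the rewrite author's own statement) =====
-- stated objective: faster
-- what changed: B replaces A's per-digit loop that adds 10**i for every i in range(t) with a closed form: the digit sum (computed by divmod, not str) times the repunit (10**t - 1) // 9 computed via fast exponentiation.
import Mathlib
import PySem

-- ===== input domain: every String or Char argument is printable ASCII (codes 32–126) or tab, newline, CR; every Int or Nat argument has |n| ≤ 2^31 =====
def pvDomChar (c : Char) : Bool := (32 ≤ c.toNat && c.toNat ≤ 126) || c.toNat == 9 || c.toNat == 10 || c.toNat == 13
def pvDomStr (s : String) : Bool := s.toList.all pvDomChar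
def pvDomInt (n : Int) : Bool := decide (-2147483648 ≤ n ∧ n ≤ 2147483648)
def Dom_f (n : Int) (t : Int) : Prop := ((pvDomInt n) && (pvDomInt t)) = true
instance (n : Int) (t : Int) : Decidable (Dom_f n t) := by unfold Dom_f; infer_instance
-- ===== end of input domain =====

-- B computes the digit sum (by divmod) times the repunit (10^t-1)//9 instead of A's
-- nested per-digit/per-position accumulation over str(n): asymptotically faster.


-- ===== PORT A =====
-- int(x) for a single character x of str(n): never raises here since str of a
-- nonnegative int is all digits; the getD 0 default is unreachable.
def fCharVal (x : Char) : Int := (PySem.Int.ofChars? [x]).getD 0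

-- the body of A for n ≥ 0 (Python's `f` recurses at most once, on -n ≥ 0,
-- so the recursion is unrolled into this helper applied under the sign test)
def fLoop (n : Int) (t : Int) : Int :=
  (PySem.Int.toChars n).foldl
    (fun r x =>
      (PySem.List.pyRange 0 t 1).foldl
        (fun r i => r + 10 ^ i.toNat * fCharVal x) r)  -- 10 ** i, i ≥ 0 in range(t)
    0

def f (n : Int) (t : Int) : Int :=
  if n < 0 then -(fLoop (-n) t) else fLoop n t

-- ===== PORT B =====
-- the while loop: while n > 0: n, d = divmod(n, 10); ds += d   (n = abs(original))
def fDigitLoop (m : Nat) (ds : Int) : Int :=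
  if m > 0 then fDigitLoop (m / 10) (ds + (m % 10 : Nat)) else ds
decreasing_by exact Nat.div_lt_self (by omega) (by omega)

def f_alt (n : Int) (t : Int) : Int :=
  if t ≤ 0 then 0
  else
    let sign : Int := if n < 0 then -1 else 1
    let ds := fDigitLoop n.natAbs 0
    sign * ds * PySem.Int.floordiv (10 ^ t.toNat - 1) 9

-- ===== PRECONDITION & SPEC =====
def Spec_f (n : Int) (t : Int) (out : Int) : Prop := out = f_alt n t
instance (n : Int) (t : Int) (out : Int) : Decidable (Spec_f n t out) := by unfold Spec_f; infer_instance

-- ===== CLAIM (what is proved, stated in full; the proofs are below) =====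
def Claim_equal_f : Prop := ∀ (n : Int) (t : Int), Dom_f n t → Spec_f n t (f n t)

-- ===== LEMMAS AND PROOFS =====

-- digit sum of a natural number, the invariant value of B's while loop
def dsumN (m : Nat) : Int :=
  if m = 0 then 0 else (m % 10 : Nat) + dsumN (m / 10)
decreasing_by exact Nat.div_lt_self (by omega) (by omega)

theorem fDigitLoop_eq (m : Nat) (ds : Int) : fDigitLoop m ds = ds + dsumN m := by
  induction m using Nat.strong_induction_on generalizing ds with
  | _ m ih =>
    rw [fDigitLoop, dsumN]
    by_cases h : m = 0
    · simp [h]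
    · simp only [if_pos (Nat.pos_of_ne_zero h), if_neg h]
      rw [ih (m / 10) (Nat.div_lt_self (Nat.pos_of_ne_zero h) (by omega))]
      ring

theorem fCharVal_digitChar (d : Nat) (hd : d < 10) :
    fCharVal d.digitChar = (d : Int) := by
  interval_cases d <;> decide

theorem sum_toDigitsCore (m : Nat) :
    ∀ (fuel : Nat) (acc : List Char), m < fuel →
      ((Nat.toDigitsCore 10 fuel m acc).map fCharVal).sum
        = dsumN m + (acc.map fCharVal).sum := by
  induction m using Nat.strong_induction_on with
  | _ m ih =>
    intro fuel acc hfuel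
    match fuel with
    | 0 => omega
    | fuel + 1 =>
      rw [Nat.toDigitsCore]
      by_cases h : m / 10 = 0
      · simp only [if_pos h, List.map_cons, List.sum_cons]
        rw [fCharVal_digitChar _ (Nat.mod_lt _ (by omega))]
        rw [dsumN]
        by_cases hm : m = 0
        · simp [hm]
        · rw [if_neg hm, dsumN, if_pos h]
          push_cast; ring
      · simp only [if_neg h]
        have hm10 : 10 ≤ m := by
          by_contra hlt
          exact h (Nat.div_eq_of_lt (by omega))
        rw [ih (m / 10) (Nat.div_lt_self (by omega) (by omega)) fuel _ (by omega)]
        simp only [List.map_cons, List.sum_cons]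
        conv_rhs => rw [dsumN]
        rw [if_neg (by omega)]
        rw [fCharVal_digitChar _ (Nat.mod_lt _ (by omega))]
        push_cast; ring

theorem sum_toChars (n : Int) (hn : 0 ≤ n) :
    ((PySem.Int.toChars n).map fCharVal).sum = dsumN n.toNat := by
  rw [PySem.Int.toChars, if_neg (by omega), Nat.toDigits]
  rw [sum_toDigitsCore n.toNat (n.toNat + 1) [] (by omega)]
  simp

-- the repunit as the geometric sum A's inner loop accumulates
def repS (k : Nat) : Int := ((List.range k).map (fun i => (10:Int) ^ i)).sum

theorem nine_mul_repS (k : Nat) : 9 * repS k = 10 ^ k - 1 := by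
  induction k with
  | zero => simp [repS]
  | succ k ih =>
    rw [repS, List.range_succ, List.map_append, List.sum_append] at *
    simp only [List.map_cons, List.map_nil, List.sum_cons, List.sum_nil]
    rw [pow_succ]
    nlinarith [ih]

theorem floordiv_repunit (k : Nat) :
    PySem.Int.floordiv (10 ^ k - 1) 9 = repS k := by
  rw [PySem.Int.floordiv_eq_iff_of_pos (by omega)]
  have := nine_mul_repS k
  constructor <;> nlinarith

theorem inner_loop (t : Int) (r d : Int) :
    (PySem.List.pyRange 0 t 1).foldl (fun r i => r + 10 ^ i.toNat * d) r
      = r + (if t ≤ 0 then 0 else repS t.toNat) * d := by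
  by_cases ht : t ≤ 0
  · have : PySem.List.pyRange 0 t 1 = [] := by
      simp [PySem.List.pyRange]; omega
    simp [this, ht]
  · have hr : PySem.List.pyRange 0 t 1 = (List.range t.toNat).map (fun k : Nat => (k : Int)) := by
      have h0 := PySem.List.pyRange_zero_natCast t.toNat
      rw [show ((t.toNat : Int)) = t from by omega] at h0
      exact h0
    rw [if_neg ht, hr, PySem.List.foldl_add _ (fun i : Int => 10 ^ i.toNat * d) r]
    rw [repS]
    simp only [List.map_map]
    have hmc : ((List.range t.toNat).map ((fun i : Int => 10 ^ i.toNat * d) ∘ (fun k : Nat => (k : Int))))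
        = (List.range t.toNat).map (fun i => (10:Int) ^ i * d) := by
      apply List.map_congr_left
      intro a _
      simp
    rw [hmc, ← List.sum_map_mul_right]

theorem fLoop_eq (n : Int) (t : Int) (hn : 0 ≤ n) :
    fLoop n t = (if t ≤ 0 then 0 else repS t.toNat) * dsumN n.toNat := by
  rw [fLoop]
  have hbody : ∀ (r : Int) (x : Char),
      (PySem.List.pyRange 0 t 1).foldl (fun r i => r + 10 ^ i.toNat * fCharVal x) r
        = r + (if t ≤ 0 then 0 else repS t.toNat) * fCharVal x := fun r x => inner_loop t r (fCharVal x)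
  calc (PySem.Int.toChars n).foldl
        (fun r x => (PySem.List.pyRange 0 t 1).foldl (fun r i => r + 10 ^ i.toNat * fCharVal x) r) 0
      = (PySem.Int.toChars n).foldl
        (fun r x => r + (if t ≤ 0 then 0 else repS t.toNat) * fCharVal x) 0 := by
        exact PySem.List.foldl_congr_mem _ _ _ 0 (fun r x _ => hbody r x)
    _ = 0 + ((PySem.Int.toChars n).map (fun x => (if t ≤ 0 then 0 else repS t.toNat) * fCharVal x)).sum := by
        exact PySem.List.foldl_add _ _ 0
    _ = (if t ≤ 0 then 0 else repS t.toNat) * dsumN n.toNat := by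
        rw [← sum_toChars n hn, zero_add, ← List.sum_map_mul_left]

-- ===== VERDICT (by name: the statement is the Claim_ definition above) =====
theorem f_spec : Claim_equal_f := by
  intro n t _
  unfold Spec_f f f_alt
  rw [fDigitLoop_eq, floordiv_repunit, zero_add]
  by_cases ht : t ≤ 0
  · rw [if_pos ht]
    by_cases hn : n < 0
    · rw [if_pos hn, fLoop_eq (-n) t (by omega), if_pos ht]; ring
    · rw [if_neg hn, fLoop_eq n t (by omega), if_pos ht]; ring
  · by_cases hn : n < 0
    · rw [if_pos hn, if_neg ht, fLoop_eq (-n) t (by omega), if_neg ht]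
      have : (-n).toNat = n.natAbs := by omega
      rw [this, if_pos hn]
      ring
    · rw [if_neg hn, if_neg ht, fLoop_eq n t (by omega), if_neg ht]
      have : n.toNat = n.natAbs := by omega
      rw [this, if_neg hn]
      ring
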